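-- pv_equiv track=rewrite | github.com/damoc1es/AdventOfCode-2023 | src/day18.py | path_from_instructions
-- ===== SOURCE A (Python) =====
-- def path_from_instructions(instr: list[tuple[str, int]]) -> list[tuple[int]]:
--     min_x = min_y = float('inf')
--     max_x = max_y = float('-inf')
--     x = y = 0
--
--     for direction, value in instr:
--         if direction == 'L':
--             y -= value
--         elif direction == 'R':
--             y += value
--         elif direction == 'U':
--             x -= value
--         elif direction == 'D':
--             x += value
--
--         min_x, max_x = min(x, min_x), max(x, max_x)
--         min_y, max_y = min(y, min_y), max(y, max_y)
--
--     x, y = abs(min_x), abs(min_y)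
--     path = [(x, y)]
--
--     for direction, value in instr:
--         if direction == 'L':
--             y -= value
--         elif direction == 'R':
--             y += value
--         elif direction == 'U':
--             x -= value
--         elif direction == 'D':
--             x += value
--         path.append((x, y))
--     return path
-- ===== SOURCE B (Python) =====
-- def path_from_instructions(instr: list[tuple[str, int]]) -> list[tuple[int]]:
--     DELTA = {'L': (0, -1), 'R': (0, 1), 'U': (-1, 0), 'D': (1, 0)}
--     deltas = [(dx * v, dy * v) for (d, v) in instr for (dx, dy) in [DELTA.get(d, (0, 0))]]
--     raw = [(0, 0)]
--     for dx, dy in deltas: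
--         px, py = raw[-1]
--         raw.append((px + dx, py + dy))
--     off_x = abs(min(x for x, _ in raw[1:]))
--     off_y = abs(min(y for _, y in raw[1:]))
--     return [(x + off_x, y + off_y) for x, y in raw]
-- ===== Notes on version B (the rewrite author's own statement) =====
-- stated objective: alternative
-- what changed: A simulates the moves twice with an if/elif chain mutating x/y and running minima; B first translates each instruction into a scaled delta vector via a direction table, builds the raw vertices as cumulative sums of those deltas, takes the minima of the raw coordinates afterwards with min(), and shifts every vertex by the offset in a final map.
-- outside the precondition, e.g. on path_from_instructions([]): A returns [(inf, inf)], B raises ValueError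
import Mathlib
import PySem

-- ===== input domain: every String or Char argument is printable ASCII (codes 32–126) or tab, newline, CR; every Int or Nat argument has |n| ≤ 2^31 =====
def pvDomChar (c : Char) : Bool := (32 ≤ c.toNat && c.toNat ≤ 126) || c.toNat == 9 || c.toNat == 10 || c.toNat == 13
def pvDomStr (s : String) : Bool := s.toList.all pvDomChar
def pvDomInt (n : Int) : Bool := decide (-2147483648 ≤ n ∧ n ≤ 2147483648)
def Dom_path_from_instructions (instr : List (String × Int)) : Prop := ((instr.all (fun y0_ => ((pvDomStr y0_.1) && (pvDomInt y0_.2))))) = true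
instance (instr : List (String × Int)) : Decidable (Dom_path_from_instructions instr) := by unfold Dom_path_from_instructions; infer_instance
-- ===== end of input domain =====

-- B translates instructions into scaled delta vectors via a direction table, builds the raw
-- vertices as cumulative sums of the deltas, takes the minima afterwards with min(), and shifts
-- every vertex by the offset; A instead simulates the moves twice with an if/elif chain and
-- running minima. Return-value equivalence only.

-- ===== PORT A =====
-- Python's float('inf') minimum seed is modelled as `none` (min(x, inf) = x); under
-- Pre_ (instr ≠ []) the minima are always `some` after the loop, exactly as in Python.
def pvOptMin (a : Int) : Option Int → Int
  | none => a
  | some m => min a m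

-- A's step: the if/elif chain updating (x, y), branches in source order.
def pvMoveA (d : String) (v : Int) (x y : Int) : Int × Int :=
  if d = "L" then (x, y - v)
  else if d = "R" then (x, y + v)
  else if d = "U" then (x - v, y)
  else if d = "D" then (x + v, y)
  else (x, y)

-- A's first loop: carries (x, y) and the running minima (max_x/max_y are dead in A and dropped).
def pvPass1 : List (String × Int) → Int → Int → Option Int → Option Int → Option Int × Option Int
  | [], _, _, mx, my => (mx, my)
  | (d, v) :: rest, x, y, mx, my =>
    let (x', y') := pvMoveA d v x y
    pvPass1 rest x' y' (some (pvOptMin x' mx)) (some (pvOptMin y' my))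

-- A's second loop: re-simulates the moves from the offset start, appending each position.
def pvPass2 : List (String × Int) → Int → Int → List (Int × Int)
  | [], _, _ => []
  | (d, v) :: rest, x, y =>
    let (x', y') := pvMoveA d v x y
    (x', y') :: pvPass2 rest x' y'

def path_from_instructions (instr : List (String × Int)) : List (Int × Int) :=
  let (mx, my) := pvPass1 instr 0 0 none none
  let x := |mx.getD 0|
  let y := |my.getD 0|
  (x, y) :: pvPass2 instr x y

-- ===== PORT B =====
-- Source B's DELTA table and its .get with default.
def pvDeltaTable : PySem.Dict String (Int × Int) :=
  PySem.Dict.ofList [("L", (0, -1)), ("R", (0, 1)), ("U", (-1, 0)), ("D", (1, 0))]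

-- Source B's delta comprehension: each instruction scaled into a (dx*v, dy*v) vector.
def pvDeltas (instr : List (String × Int)) : List (Int × Int) :=
  instr.map (fun dv =>
    let u := pvDeltaTable.getD dv.1 (0, 0)
    (u.1 * dv.2, u.2 * dv.2))

-- Source B's cumulative-sum loop: the accumulator is raw[-1], the last vertex appended.
def pvCumul : List (Int × Int) → Int × Int → List (Int × Int)
  | [], _ => []
  | (dx, dy) :: rest, (px, py) => (px + dx, py + dy) :: pvCumul rest (px + dx, py + dy)

-- min(...) over an empty generator raises ValueError in Python: min? = none there, excluded by Pre_.
def path_from_instructions_alt (instr : List (String × Int)) : List (Int × Int) :=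
  let raw : List (Int × Int) := (0, 0) :: pvCumul (pvDeltas instr) (0, 0)
  let offX := |((PySem.List.min? ((raw.drop 1).map Prod.fst) (fun a => a)).getD 0)|
  let offY := |((PySem.List.min? ((raw.drop 1).map Prod.snd) (fun a => a)).getD 0)|
  raw.map (fun p => (p.1 + offX, p.2 + offY))

-- ===== PRECONDITION & SPEC =====
-- Pre_ excludes the empty list: there Python A returns [(inf, inf)], a float tuple that is not
-- a value of the declared int-pair type (and B's min() raises ValueError).
def Pre_path_from_instructions (instr : List (String × Int)) : Prop := instr ≠ []
instance (instr : List (String × Int)) : Decidable (Pre_path_from_instructions instr) := by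
  unfold Pre_path_from_instructions; infer_instance
def pvWitness_path_from_instructions : (List (String × Int)) := [("R", 3)]

def Spec_path_from_instructions (instr : List (String × Int)) (out : List (Int × Int)) : Prop :=
  out = path_from_instructions_alt instr
instance (instr : List (String × Int)) (out : List (Int × Int)) :
    Decidable (Spec_path_from_instructions instr out) := by
  unfold Spec_path_from_instructions; infer_instance

-- ===== CLAIM =====
def Claim_equal_path_from_instructions : Prop :=
  ∀ (instr : List (String × Int)), Dom_path_from_instructions instr →
    Pre_path_from_instructions instr →
    Spec_path_from_instructions instr (path_from_instructions instr)

-- ===== LEMMAS AND PROOFS =====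

-- Evaluate Source B's literal direction table.
theorem pvTable_eval :
    pvDeltaTable = PySem.Dict.mk [("L", (0, -1)), ("R", (0, 1)), ("U", (-1, 0)), ("D", (1, 0))] := by
  decide

theorem pvGetD_table (d : String) :
    pvDeltaTable.getD d (0, 0) =
      if d = "L" then (0, -1) else if d = "R" then (0, 1)
      else if d = "U" then (-1, 0) else if d = "D" then (1, 0) else (0, 0) := by
  by_cases hL : d = "L"
  · subst hL; decide
  by_cases hR : d = "R"
  · subst hR; decide
  by_cases hU : d = "U"
  · subst hU; decide
  by_cases hD : d = "D"
  · subst hD; decide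
  simp only [hL, hR, hU, hD, if_false]
  rw [pvTable_eval, PySem.Dict.getD_eq_get?_getD]
  simp [PySem.Dict.get?,
    Ne.symm hL, Ne.symm hR, Ne.symm hU, Ne.symm hD]

-- A's move equals adding B's scaled delta.
theorem pvMove_eq_delta (d : String) (v x y : Int) :
    pvMoveA d v x y =
      (x + (pvDeltaTable.getD d (0, 0)).1 * v, y + (pvDeltaTable.getD d (0, 0)).2 * v) := by
  rw [pvMoveA, pvGetD_table]
  split_ifs <;> refine Prod.ext ?_ ?_ <;> simp <;> ring

-- A's second pass equals B's cumulative sums from the same start.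
theorem pvPass2_eq_cumul (instr : List (String × Int)) :
    ∀ (x y : Int), pvPass2 instr x y = pvCumul (pvDeltas instr) (x, y) := by
  induction instr with
  | nil => intro x y; rfl
  | cons h t ih =>
    intro x y
    obtain ⟨d, v⟩ := h
    simp only [pvPass2, pvDeltas, List.map_cons, pvCumul, pvMove_eq_delta,
      List.cons.injEq]
    refine ⟨trivial, ?_⟩
    simpa [pvDeltas] using ih (x + (pvDeltaTable.getD d (0, 0)).1 * v)
      (y + (pvDeltaTable.getD d (0, 0)).2 * v)

-- Shifting the start shifts every cumulative vertex.
theorem pvCumul_shift (ds : List (Int × Int)) :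
    ∀ (x y ox oy : Int),
      pvCumul ds (x + ox, y + oy) = (pvCumul ds (x, y)).map (fun p => (p.1 + ox, p.2 + oy)) := by
  induction ds with
  | nil => intro x y ox oy; rfl
  | cons h t ih =>
    intro x y ox oy
    obtain ⟨dx, dy⟩ := h
    simp only [pvCumul, List.map_cons, List.cons.injEq]
    refine ⟨Prod.ext (by ring) (by ring), ?_⟩
    rw [show x + ox + dx = x + dx + ox by ring, show y + oy + dy = y + dy + oy by ring]
    exact ih (x + dx) (y + dy) ox oy

-- The running-min fold A performs, seeded with `none` (= float('inf')).
def pvFoldMin (mx : Option Int) (xs : List Int) : Option Int :=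
  xs.foldl (fun m a => some (pvOptMin a m)) mx

-- A's first pass computes exactly the running minima of the visited coordinates.
theorem pvPass1_eq_foldMin (instr : List (String × Int)) :
    ∀ (x y : Int) (mx my : Option Int),
      pvPass1 instr x y mx my =
        (pvFoldMin mx ((pvCumul (pvDeltas instr) (x, y)).map Prod.fst),
         pvFoldMin my ((pvCumul (pvDeltas instr) (x, y)).map Prod.snd)) := by
  induction instr with
  | nil => intro x y mx my; rfl
  | cons h t ih =>
    intro x y mx my
    obtain ⟨d, v⟩ := h
    simp only [pvPass1, pvMove_eq_delta, pvDeltas, List.map_cons, pvCumul, pvFoldMin,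
      List.foldl_cons]
    simpa [pvDeltas, pvFoldMin] using ih _ _ _ _

-- The `none`-seeded running min of a nonempty list is Python's min().
theorem pvFoldMin_none_eq_min? (xs : List Int) (h : xs ≠ []) :
    pvFoldMin none xs = PySem.List.min? xs (fun a => a) := by
  cases xs with
  | nil => exact absurd rfl h
  | cons a t =>
    rw [PySem.List.min?_id_cons]
    simp only [pvFoldMin, List.foldl_cons, pvOptMin]
    induction t generalizing a with
    | nil => rfl
    | cons b u ih => simpa [pvFoldMin, pvOptMin, min_comm] using ih (min b a)

theorem pvCumul_deltas_ne_nil (instr : List (String × Int)) (h : instr ≠ []) (x y : Int) :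
    pvCumul (pvDeltas instr) (x, y) ≠ [] := by
  cases instr with
  | nil => exact absurd rfl h
  | cons hd t => obtain ⟨d, v⟩ := hd; simp [pvDeltas, pvCumul]

-- ===== VERDICT =====
theorem path_from_instructions_spec : Claim_equal_path_from_instructions := by
  intro instr _ hpre
  unfold Spec_path_from_instructions path_from_instructions path_from_instructions_alt
  rw [pvPass1_eq_foldMin]
  have hne := pvCumul_deltas_ne_nil instr hpre 0 0
  rw [pvFoldMin_none_eq_min? _ (by simpa using hne),
      pvFoldMin_none_eq_min? _ (by simpa using hne)]
  simp only [List.drop_one, List.tail_cons]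
  rw [pvPass2_eq_cumul]
  set ox := |((PySem.List.min? ((pvCumul (pvDeltas instr) (0, 0)).map Prod.fst) fun a => a).getD 0)|
  set oy := |((PySem.List.min? ((pvCumul (pvDeltas instr) (0, 0)).map Prod.snd) fun a => a).getD 0)|
  have h := pvCumul_shift (pvDeltas instr) 0 0 ox oy
  simp only [zero_add] at h
  simp [h]
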